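-- pv_equiv track=rewrite | github.com/Sulfirio/Analizador_Lexico_Na | Cris/reconocer_ids.py | recognize_comments
-- ===== SOURCE A (Python) =====
-- def recognize_comments(input_string):
--     # Definimos los estados
--     S0 = 0
--     S1 = 1
--     S2 = 2
--     S3 = 3
--     S4 = 4
--
--     state = S0
--     pos = 0
--     comments = []
--     comment_start = -1
--
--     while pos < len(input_string):
--         char = input_string[pos]
--
--         # Estado inicial (S0)
--         if state == S0:
--             if char == '/':
--                 state = S1
--                 comment_start = pos
--             pos += 1
--
--         # Estado S1
--         elif state == S1:
--             if char == '/':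
--                 state = S2
--             elif char == '*':
--                 state = S3
--             else:
--                 state = S0
--                 comment_start = -1
--             pos += 1
--
--         # Estado S2 (comentario de línea única)
--         elif state == S2:
--             if char == '\n':
--                 state = S0
--                 comments.append(input_string[comment_start:pos])
--                 comment_start = -1
--             pos += 1
--
--         # Estado S3 (comienzo de comentario de múltiples líneas)
--         elif state == S3:
--             if char == '*':
--                 state = S4
--             pos += 1
--
--         # Estado S4
--         elif state == S4:
--             if char == '/':
--                 state = S0
--                 comments.append(input_string[comment_start:pos + 1])
--                 comment_start = -1
--             elif char == '*':
--                 # Nos mantenemos en S4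
--                 pass
--             else:
--                 state = S3
--             pos += 1
--
--     return comments
-- ===== SOURCE B (Python) =====
-- def recognize_comments(input_string):
--     comments = []
--     pos = 0
--     n = len(input_string)
--     while pos < n:
--         window = input_string[pos:pos + 2]
--         if window == '//':
--             end = input_string.find('\n', pos + 2)
--             if end == -1:
--                 break
--             comments.append(input_string[pos:end])
--             pos = end + 1
--         elif window == '/*':
--             end = input_string.find('*/', pos + 2)
--             if end == -1:
--                 break
--             comments.append(input_string[pos:end + 2])
--             pos = end + 2
--         else:
--             pos += 1
--     return comments
-- ===== Notes on version B (the rewrite author's own statement) =====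
-- stated objective: idiomatic
-- what changed: Replaced the per-character 5-state DFA (explicit state variable and comment_start bookkeeping) with a cursor-and-delimiter scanner that inspects the two-char window input[pos:pos+2] and jumps directly to the comment terminator with str.find.
import Mathlib
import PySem

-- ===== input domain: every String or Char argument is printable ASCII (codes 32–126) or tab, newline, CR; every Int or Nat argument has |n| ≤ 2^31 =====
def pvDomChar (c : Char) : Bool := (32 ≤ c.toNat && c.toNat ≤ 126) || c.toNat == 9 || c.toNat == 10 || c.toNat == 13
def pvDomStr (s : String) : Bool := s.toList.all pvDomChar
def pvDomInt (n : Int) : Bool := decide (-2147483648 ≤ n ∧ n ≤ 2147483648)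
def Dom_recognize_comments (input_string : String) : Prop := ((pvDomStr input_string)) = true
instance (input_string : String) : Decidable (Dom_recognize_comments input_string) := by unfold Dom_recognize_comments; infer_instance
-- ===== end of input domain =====

-- B replaces A's per-character 5-state DFA with a cursor-and-delimiter scanner that jumps with
-- str.find; same return value on every input (both are total); objective: idiomatic.

-- ===== PORT A =====
-- A's while loop: pos cursor, state ∈ {0..4}, comment_start, accumulated comments.
def goA (cs : List Char) (pos : Nat) (state : Nat) (cstart : Int) (acc : List String) : List String :=
  if h : pos < cs.length then
    let c := cs[pos]
    if state = 0 then
      if c = '/' then goA cs (pos + 1) 1 (pos : Int) acc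
      else goA cs (pos + 1) 0 cstart acc
    else if state = 1 then
      if c = '/' then goA cs (pos + 1) 2 cstart acc
      else if c = '*' then goA cs (pos + 1) 3 cstart acc
      else goA cs (pos + 1) 0 (-1) acc
    else if state = 2 then
      if c = '\n' then
        goA cs (pos + 1) 0 (-1)
          (acc ++ [String.ofList (PySem.List.slice cs (some cstart) (some (pos : Int)))])
      else goA cs (pos + 1) 2 cstart acc
    else if state = 3 then
      if c = '*' then goA cs (pos + 1) 4 cstart acc
      else goA cs (pos + 1) 3 cstart acc
    else
      if c = '/' then
        goA cs (pos + 1) 0 (-1)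
          (acc ++ [String.ofList (PySem.List.slice cs (some cstart) (some ((pos : Int) + 1)))])
      else if c = '*' then goA cs (pos + 1) 4 cstart acc
      else goA cs (pos + 1) 3 cstart acc
  else acc
termination_by cs.length - pos

def recognize_comments (input_string : String) : List String :=
  goA input_string.toList 0 0 (-1) []

-- ===== PORT B =====
-- termination helpers for goB (cited by decreasing_by): str.find(sub, k) with k past the end is -1,
-- and a non-(-1) result is ≥ k.
lemma pvFindFromPastLen (cs sub : List Char) (k : Nat) (hk : cs.length < k) :
    PySem.Chars.findFrom cs sub (k : Int) none = -1 := by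
  unfold PySem.Chars.findFrom
  have h1 : ¬ ((k : Int) < 0) := by omega
  have h2 : (cs.length : Int) < (k : Int) := by exact_mod_cast hk
  simp only [h1, if_false]
  rw [if_pos h2]

lemma pvFindFromGe (cs sub : List Char) (k : Nat)
    (h : PySem.Chars.findFrom cs sub (k : Int) none ≠ -1) :
    (k : Int) ≤ PySem.Chars.findFrom cs sub (k : Int) none := by
  by_cases hk : k ≤ cs.length
  · exact (PySem.Chars.findFrom_natCast_spec cs sub k hk h).1
  · exact absurd (pvFindFromPastLen cs sub k (by omega)) h

-- B's while loop: cursor + two-char window + find jumps.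
def goB (cs : List Char) (pos : Nat) (acc : List String) : List String :=
  if h : pos < cs.length then
    let window := PySem.List.slice cs (some (pos : Int)) (some ((pos : Int) + 2))
    if window = ['/', '/'] then
      let e := PySem.Chars.findFrom cs ['\n'] ((pos : Int) + 2) none
      if he : e = -1 then acc
      else goB cs (e.toNat + 1)
        (acc ++ [String.ofList (PySem.List.slice cs (some (pos : Int)) (some e))])
    else if window = ['/', '*'] then
      let e := PySem.Chars.findFrom cs ['*', '/'] ((pos : Int) + 2) none
      if he : e = -1 then acc
      else goB cs (e.toNat + 2)
        (acc ++ [String.ofList (PySem.List.slice cs (some (pos : Int)) (some (e + 2)))])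
    else goB cs (pos + 1) acc
  else acc
termination_by cs.length - pos
decreasing_by
  · have he' : PySem.Chars.findFrom cs ['\n'] ((pos : Int) + 2) none ≠ -1 := he
    have hc : ((pos : Int) + 2) = (((pos + 2 : Nat) : Int)) := by push_cast; ring
    rw [hc] at he' ⊢
    have := pvFindFromGe cs ['\n'] (pos + 2) he'
    omega
  · have he' : PySem.Chars.findFrom cs ['*', '/'] ((pos : Int) + 2) none ≠ -1 := he
    have hc : ((pos : Int) + 2) = (((pos + 2 : Nat) : Int)) := by push_cast; ring
    rw [hc] at he' ⊢
    have := pvFindFromGe cs ['*', '/'] (pos + 2) he'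
    omega
  · omega

def recognize_comments_alt (input_string : String) : List String :=
  goB input_string.toList 0 []

-- ===== PRECONDITION & SPEC =====
def Spec_recognize_comments (input_string : String) (out : List String) : Prop := out = recognize_comments_alt input_string
instance (input_string : String) (out : List String) : Decidable (Spec_recognize_comments input_string out) := by unfold Spec_recognize_comments; infer_instance

-- ===== CLAIM (what is proved, stated in full; the proofs are below) =====
def Claim_equal_recognize_comments : Prop := ∀ (input_string : String), Dom_recognize_comments input_string → Spec_recognize_comments input_string (recognize_comments input_string)

-- ===== LEMMAS AND PROOFS =====

-- first position of l at which sub is a prefix of the remaining suffix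
def firstAt (sub : List Char) : List Char → Option Nat
  | [] => none
  | c :: rest =>
    if sub.isPrefixOf (c :: rest) then some 0 else (firstAt sub rest).map (· + 1)

lemma firstAt_none_iff (sub : List Char) (hs : sub ≠ []) :
    ∀ l, firstAt sub l = none ↔ ∀ i, ¬ sub <+: l.drop i := by
  intro l
  induction l with
  | nil =>
    constructor
    · intro _ i
      simp only [List.drop_nil]
      exact fun hpre => hs (List.prefix_nil.mp hpre)
    · intro _; rfl
  | cons c rest ih =>
    by_cases hp : sub.isPrefixOf (c :: rest)
    · simp only [firstAt, if_pos hp]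
      constructor
      · intro h; exact absurd h (by simp)
      · intro h
        exact absurd (List.isPrefixOf_iff_prefix.1 hp) (by simpa using h 0)
    · simp only [firstAt, if_neg hp, Option.map_eq_none_iff, ih]
      constructor
      · intro h i
        cases i with
        | zero => simpa using fun hpre => hp (List.isPrefixOf_iff_prefix.2 hpre)
        | succ j => simpa using h j
      · intro h i
        simpa using h (i + 1)

lemma firstAt_some (sub : List Char) :
    ∀ l j, firstAt sub l = some j → sub <+: l.drop j ∧ ∀ i < j, ¬ sub <+: l.drop i := by
  intro l
  induction l with
  | nil => intro j h; simp [firstAt] at h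
  | cons c rest ih =>
    intro j h
    by_cases hp : sub.isPrefixOf (c :: rest)
    · simp only [firstAt, if_pos hp] at h
      cases h
      exact ⟨by simpa using List.isPrefixOf_iff_prefix.1 hp, by omega⟩
    · simp only [firstAt, if_neg hp, Option.map_eq_some_iff] at h
      obtain ⟨k, hk, rfl⟩ := h
      obtain ⟨h1, h2⟩ := ih k hk
      refine ⟨by simpa using h1, ?_⟩
      intro i hi
      cases i with
      | zero => simpa using fun hpre => hp (List.isPrefixOf_iff_prefix.2 hpre)
      | succ m => simpa using h2 m (by omega)

lemma find_eq_firstAt (sub : List Char) (hs : sub ≠ []) (l : List Char) :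
    PySem.Chars.find l sub =
      (match firstAt sub l with
       | none => (-1 : Int)
       | some j => (j : Int)) := by
  cases hf : firstAt sub l with
  | none =>
    simp only []
    rw [(PySem.Chars.find_eq_neg_one_iff l sub).2]
    intro hinf
    obtain ⟨t, u, rfl⟩ := hinf
    exact ((firstAt_none_iff sub hs _).1 hf) t.length (by simp)
  | some j =>
    obtain ⟨h1, h2⟩ := firstAt_some sub l j hf
    have hinf : sub <:+: l := h1.isInfix.trans (List.drop_suffix j l).isInfix
    have hne : PySem.Chars.find l sub ≠ -1 := fun hh =>
      ((PySem.Chars.find_eq_neg_one_iff l sub).1 hh) hinf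
    have hz : PySem.Chars.findFrom l sub ((0 : Nat) : Int) none = PySem.Chars.find l sub := by
      simp [PySem.Chars.findFrom_zero]
    have hspec := PySem.Chars.findFrom_natCast_spec l sub 0 (by omega) (by rw [hz]; exact hne)
    rw [hz] at hspec
    obtain ⟨hge, hpre, hmin⟩ := hspec
    have hj : (PySem.Chars.find l sub).toNat = j := by
      rcases Nat.lt_trichotomy (PySem.Chars.find l sub).toNat j with h | h | h
      · exact absurd hpre (h2 _ h)
      · exact h
      · exact absurd h1 (hmin j (by omega) h)
    simp only []
    omega


-- str.find(sub, k) located through firstAt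
lemma findFrom_eq_firstAt (cs sub : List Char) (hs : sub ≠ []) (k : Nat) :
    PySem.Chars.findFrom cs sub (k : Int) none =
      (match firstAt sub (cs.drop k) with
       | none => (-1 : Int)
       | some j => ((k + j : Nat) : Int)) := by
  by_cases hk : k ≤ cs.length
  · rw [PySem.Chars.findFrom_natCast cs sub k hk, find_eq_firstAt sub hs (cs.drop k)]
    cases hfa : firstAt sub (cs.drop k) with
    | none =>
      simp only []
      rw [if_pos trivial]
    | some j =>
      have hj : ¬ (((j : Nat) : Int) = -1) := by omega
      simp [hj]
  · rw [pvFindFromPastLen cs sub k (by omega), List.drop_eq_nil_of_le (by omega)]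
    rfl

-- A's state S2 (inside a line comment) scans to the next newline.
lemma goA_state2 (cs : List Char) :
    ∀ n pos cstart acc, cs.length - pos ≤ n →
      goA cs pos 2 cstart acc =
        (match firstAt ['\n'] (cs.drop pos) with
         | none => acc
         | some j => goA cs (pos + j + 1) 0 (-1)
             (acc ++ [String.ofList (PySem.List.slice cs (some cstart) (some ((pos + j : Nat) : Int)))])) := by
  intro n
  induction n with
  | zero =>
    intro pos cstart acc hn
    have h : ¬ pos < cs.length := by omega
    rw [List.drop_eq_nil_of_le (by omega)]
    conv_lhs => rw [goA.eq_def]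
    simp [h, firstAt]
  | succ n ih =>
    intro pos cstart acc hn
    by_cases h : pos < cs.length
    · have hdrop : cs.drop pos = cs[pos] :: cs.drop (pos + 1) := List.drop_eq_getElem_cons h
      conv_lhs => rw [goA.eq_def]
      simp only [dif_pos h]
      norm_num
      by_cases hc : cs[pos] = '\n'
      · rw [if_pos hc, hdrop, hc]
        rw [show firstAt ['\n'] ('\n' :: cs.drop (pos + 1)) = some 0 from by
          rw [firstAt, if_pos (by simp [List.isPrefixOf])]]
        norm_num
      · rw [if_neg hc, ih (pos + 1) cstart acc (by omega), hdrop]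
        have hpre : ¬ (['\n'].isPrefixOf (cs[pos] :: cs.drop (pos + 1)) = true) := by
          rw [List.isPrefixOf_iff_prefix, List.cons_prefix_cons]
          exact fun ⟨hh, _⟩ => hc hh.symm
        rw [firstAt, if_neg hpre]
        cases hfa : firstAt ['\n'] (cs.drop (pos + 1)) with
        | none => rfl
        | some k =>
          simp only [Option.map_some]
          have e1 : pos + 1 + k + 1 = pos + (k + 1) + 1 := by omega
          have e2 : pos + 1 + k = pos + (k + 1) := by omega
          rw [e1, e2]
          norm_cast
    · have hno : cs.length ≤ pos := by omega
      rw [List.drop_eq_nil_of_le hno]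
      conv_lhs => rw [goA.eq_def]
      simp [h, firstAt]

-- A's states S3/S4 (inside a block comment) scan to the closing "*/" (in S4 a '*' was just seen).
lemma goA_state34 (cs : List Char) :
    ∀ n,
      (∀ pos cstart acc, cs.length - pos ≤ n →
        goA cs pos 3 cstart acc =
          (match firstAt ['*', '/'] (cs.drop pos) with
           | none => acc
           | some j => goA cs (pos + j + 2) 0 (-1)
               (acc ++ [String.ofList (PySem.List.slice cs (some cstart) (some ((pos + j + 2 : Nat) : Int)))]))) ∧
      (∀ pos cstart acc, cs.length - pos ≤ n →
        goA cs pos 4 cstart acc =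
          (match firstAt ['*', '/'] ('*' :: cs.drop pos) with
           | none => acc
           | some j => goA cs (pos + j + 1) 0 (-1)
               (acc ++ [String.ofList (PySem.List.slice cs (some cstart) (some ((pos + j + 1 : Nat) : Int)))]))) := by
  intro n
  induction n with
  | zero =>
    constructor
    · intro pos cstart acc hn
      have h : ¬ pos < cs.length := by omega
      rw [List.drop_eq_nil_of_le (by omega)]
      conv_lhs => rw [goA.eq_def]
      simp [h, firstAt]
    · intro pos cstart acc hn
      have h : ¬ pos < cs.length := by omega
      rw [List.drop_eq_nil_of_le (by omega)]
      conv_lhs => rw [goA.eq_def]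
      simp [h, firstAt, List.isPrefixOf]
  | succ n ih =>
    obtain ⟨ih3, ih4⟩ := ih
    constructor
    · -- state S3
      intro pos cstart acc hn
      by_cases h : pos < cs.length
      · have hdrop : cs.drop pos = cs[pos] :: cs.drop (pos + 1) := List.drop_eq_getElem_cons h
        conv_lhs => rw [goA.eq_def]
        simp only [dif_pos h]
        norm_num
        by_cases hc : cs[pos] = '*'
        · rw [if_pos hc, ih4 (pos + 1) cstart acc (by omega), hdrop, hc]
          cases hfa : firstAt ['*', '/'] ('*' :: cs.drop (pos + 1)) with
          | none => rfl
          | some k =>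
            simp only []
            have e1 : pos + 1 + k + 1 = pos + k + 2 := by omega
            rw [e1]
            norm_cast
        · rw [if_neg hc, ih3 (pos + 1) cstart acc (by omega), hdrop]
          have hp1 : ¬ (['*', '/'].isPrefixOf (cs[pos] :: cs.drop (pos + 1)) = true) := by
            rw [List.isPrefixOf_iff_prefix, List.cons_prefix_cons]
            exact fun ⟨hh, _⟩ => hc hh.symm
          rw [firstAt, if_neg hp1]
          cases hfa : firstAt ['*', '/'] (cs.drop (pos + 1)) with
          | none => rfl
          | some k =>
            simp only [Option.map_some]
            have e1 : pos + 1 + k + 2 = pos + (k + 1) + 2 := by omega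
            rw [e1]
            norm_cast
      · have hno : cs.length ≤ pos := by omega
        rw [List.drop_eq_nil_of_le hno]
        conv_lhs => rw [goA.eq_def]
        simp [h, firstAt]
    · -- state S4
      intro pos cstart acc hn
      by_cases h : pos < cs.length
      · have hdrop : cs.drop pos = cs[pos] :: cs.drop (pos + 1) := List.drop_eq_getElem_cons h
        conv_lhs => rw [goA.eq_def]
        simp only [dif_pos h]
        norm_num
        rw [hdrop]
        by_cases hc : cs[pos] = '/'
        · rw [if_pos hc, hc]
          rw [show firstAt ['*', '/'] ('*' :: '/' :: cs.drop (pos + 1)) = some 0 from by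
            rw [firstAt, if_pos (by simp [List.isPrefixOf])]]
          norm_num
        · have hp1 : ¬ (['*', '/'].isPrefixOf ('*' :: cs[pos] :: cs.drop (pos + 1)) = true) := by
            rw [List.isPrefixOf_iff_prefix, List.cons_prefix_cons, List.cons_prefix_cons]
            exact fun ⟨_, hh, _⟩ => hc hh.symm
          rw [if_neg hc, firstAt, if_neg hp1]
          by_cases hc2 : cs[pos] = '*'
          · rw [if_pos hc2, ih4 (pos + 1) cstart acc (by omega), hc2]
            cases hfa : firstAt ['*', '/'] ('*' :: cs.drop (pos + 1)) with
            | none => rfl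
            | some k =>
              simp only [Option.map_some]
              have e1 : pos + 1 + k + 1 = pos + (k + 1) + 1 := by omega
              rw [e1]
              norm_cast
          · rw [if_neg hc2, ih3 (pos + 1) cstart acc (by omega)]
            have hp2 : ¬ (['*', '/'].isPrefixOf (cs[pos] :: cs.drop (pos + 1)) = true) := by
              rw [List.isPrefixOf_iff_prefix, List.cons_prefix_cons]
              exact fun ⟨hh, _⟩ => hc2 hh.symm
            rw [firstAt, if_neg hp2]
            cases hfa : firstAt ['*', '/'] (cs.drop (pos + 1)) with
            | none => rfl
            | some k =>
              simp only [Option.map_some]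
              have e1 : pos + 1 + k + 2 = pos + (k + 1 + 1) + 1 := by omega
              rw [e1]
              norm_cast
      · have hno : cs.length ≤ pos := by omega
        rw [List.drop_eq_nil_of_le hno]
        conv_lhs => rw [goA.eq_def]
        simp [h, firstAt, List.isPrefixOf]

-- cast helper used repeatedly
lemma pvCast2 (pos : Nat) : ((pos : Int) + 2) = (((pos + 2 : Nat) : Int)) := by push_cast; ring

-- the two-char window of B is take 2 of the suffix
lemma pvWindow (cs : List Char) (pos : Nat) :
    PySem.List.slice cs (some (pos : Int)) (some ((pos : Int) + 2)) = (cs.drop pos).take 2 := by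
  have := PySem.List.slice_natCast_add cs pos 2
  simpa using this

-- main equivalence: A from S0 equals B's cursor loop
lemma goA_eq_goB (cs : List Char) :
    ∀ n pos cstart acc, cs.length - pos ≤ n →
      goA cs pos 0 cstart acc = goB cs pos acc := by
  intro n
  induction n with
  | zero =>
    intro pos cstart acc hn
    have h : ¬ pos < cs.length := by omega
    rw [goA.eq_def, goB.eq_def]
    simp [h]
  | succ n ih =>
    intro pos cstart acc hn
    by_cases h : pos < cs.length
    · have hdrop : cs.drop pos = cs[pos] :: cs.drop (pos + 1) := List.drop_eq_getElem_cons h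
      conv_lhs => rw [goA.eq_def]
      conv_rhs => rw [goB.eq_def]
      simp only [dif_pos h, Nat.reduceEqDiff, reduceIte]
      rw [pvWindow cs pos]
      have ht : List.take 2 (List.drop pos cs) = cs[pos] :: List.take 1 (List.drop (pos + 1) cs) := by
        rw [hdrop, List.take_succ_cons]
      rw [ht]
      by_cases hc : cs[pos] = '/'
      · rw [if_pos hc]
        conv_lhs => rw [goA.eq_def]
        by_cases h2 : pos + 1 < cs.length
        · have hdrop2 : cs.drop (pos + 1) = cs[pos + 1] :: cs.drop (pos + 2) :=
            List.drop_eq_getElem_cons h2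
          have ht2 : List.take 1 (List.drop (pos + 1) cs) = [cs[pos + 1]] := by
            rw [hdrop2, List.take_succ_cons, List.take_zero]
          simp only [dif_pos h2, Nat.reduceEqDiff, reduceIte]
          rw [ht2]
          have e12 : pos + 1 + 1 = pos + 2 := by omega
          rw [e12]
          by_cases hc2 : cs[pos + 1] = '/'
          · rw [if_pos hc2]
            rw [goA_state2 cs cs.length (pos + 2) (pos : Int) acc (by omega)]
            rw [if_pos (show cs[pos] :: [cs[pos + 1]] = ['/', '/'] from by rw [hc, hc2])]
            rw [pvCast2 pos, findFrom_eq_firstAt cs ['\n'] (by simp) (pos + 2)]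
            cases hfa : firstAt ['\n'] (cs.drop (pos + 2)) with
            | none =>
              simp only []
              rw [dif_pos trivial]
            | some k =>
              simp only []
              rw [dif_neg (show ¬(((pos + 2 + k : Nat) : Int) = -1) from by omega),
                Int.toNat_natCast]
              rw [ih (pos + 2 + k + 1) (-1) _ (by omega)]
          · rw [if_neg hc2]
            by_cases hc3 : cs[pos + 1] = '*'
            · rw [if_pos hc3]
              rw [(goA_state34 cs cs.length).1 (pos + 2) (pos : Int) acc (by omega)]
              rw [if_neg (show ¬(cs[pos] :: [cs[pos + 1]] = ['/', '/']) from by simp [hc2]),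
                if_pos (show cs[pos] :: [cs[pos + 1]] = ['/', '*'] from by rw [hc, hc3])]
              rw [pvCast2 pos, findFrom_eq_firstAt cs ['*', '/'] (by simp) (pos + 2)]
              cases hfa : firstAt ['*', '/'] (cs.drop (pos + 2)) with
              | none =>
                simp only []
                rw [dif_pos trivial]
              | some k =>
                simp only []
                rw [dif_neg (show ¬(((pos + 2 + k : Nat) : Int) = -1) from by omega),
                  Int.toNat_natCast]
                have ec : ((pos + 2 + k : Nat) : Int) + 2 = ((pos + 2 + k + 2 : Nat) : Int) := by
                  push_cast; ring
                rw [ec]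
                rw [ih (pos + 2 + k + 2) (-1) _ (by omega)]
            · rw [if_neg hc3]
              rw [if_neg (show ¬(cs[pos] :: [cs[pos + 1]] = ['/', '/']) from by simp [hc2]),
                if_neg (show ¬(cs[pos] :: [cs[pos + 1]] = ['/', '*']) from by simp [hc3])]
              conv_rhs => rw [goB.eq_def]
              simp only [dif_pos h2]
              rw [pvWindow cs (pos + 1)]
              have ht3 : List.take 2 (List.drop (pos + 1) cs) =
                  cs[pos + 1] :: List.take 1 (List.drop (pos + 2) cs) := by
                rw [hdrop2, List.take_succ_cons]
              rw [ht3]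
              rw [if_neg (show ¬(cs[pos + 1] :: List.take 1 (List.drop (pos + 2) cs) = ['/', '/'])
                    from by simp [hc2]),
                if_neg (show ¬(cs[pos + 1] :: List.take 1 (List.drop (pos + 2) cs) = ['/', '*'])
                    from by simp [hc2])]
              rw [e12]
              exact ih (pos + 2) (-1) acc (by omega)
        · have hd2 : List.take 1 (List.drop (pos + 1) cs) = [] := by
            rw [List.drop_eq_nil_of_le (by omega)]; rfl
          simp only [dif_neg h2]
          rw [hd2]
          rw [if_neg (show ¬(cs[pos] :: ([] : List Char) = ['/', '/']) from by simp),
            if_neg (show ¬(cs[pos] :: ([] : List Char) = ['/', '*']) from by simp)]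
          conv_rhs => rw [goB.eq_def]
          simp [h2]
      · rw [if_neg hc, ih (pos + 1) cstart acc (by omega)]
        rw [if_neg (show ¬(cs[pos] :: List.take 1 (List.drop (pos + 1) cs) = ['/', '/'])
              from by simp [hc]),
          if_neg (show ¬(cs[pos] :: List.take 1 (List.drop (pos + 1) cs) = ['/', '*'])
              from by simp [hc])]
    · rw [goA.eq_def, goB.eq_def]
      simp [h]

-- ===== VERDICT (by name: the statement is the Claim_ definition above) =====
theorem recognize_comments_spec : Claim_equal_recognize_comments := by
  intro input_string _
  unfold Spec_recognize_comments recognize_comments recognize_comments_alt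
  exact goA_eq_goB input_string.toList input_string.toList.length 0 (-1) [] (by omega)
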